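-- pv_equiv track=rewrite | github.com/hyunjun82/moneywiki | scripts/fix_errors.py | fix_h1_to_h2
-- ===== SOURCE A (Python) =====
-- def fix_h1_to_h2(content):
--     """H1을 H2로 변경 (frontmatter 이후)"""
--     lines = content.split('\n')
--     fixed = False
--     in_frontmatter = False
--     frontmatter_count = 0
--
--     for i, line in enumerate(lines):
--         if line.strip() == '---':
--             frontmatter_count += 1
--             if frontmatter_count == 2:
--                 in_frontmatter = False
--             continue
--
--         if frontmatter_count < 2:
--             continue
--
--         if line.startswith('# ') and not line.startswith('## '):
--             lines[i] = '#' + line  # # -> ##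
--             fixed = True
--
--     return '\n'.join(lines), fixed
-- ===== SOURCE B (Python) =====
-- def fix_h1_to_h2(content):
--     """H1을 H2로 변경 (frontmatter 이후)"""
--     lines = content.split('\n')
--
--     # Pass 1: locate the line just after the second '---' (end of frontmatter).
--     boundary = None
--     seen = 0
--     for idx, line in enumerate(lines):
--         if line.strip() == '---':
--             seen += 1
--             if seen == 2:
--                 boundary = idx + 1
--                 break
--
--     if boundary is None:
--         return '\n'.join(lines), False
--
--     # Pass 2: convert H1 headings to H2 in the body only.
--     fixed = False
--     body = []
--     for line in lines[boundary:]: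
--         if line.startswith('# ') and not line.startswith('## '):
--             body.append('#' + line)
--             fixed = True
--         else:
--             body.append(line)
--     return '\n'.join(lines[:boundary] + body), fixed
-- ===== Notes on version B (the rewrite author's own statement) =====
-- stated objective: alternative
-- what changed: A's single interleaved loop that counts frontmatter delimiter lines and converts headings while tracking a counter is replaced by two separate passes: one scan that only locates the index just after the closing frontmatter delimiter (with early exit), then a transform loop over the body slice alone that builds the output lines and the fixed flag.
import Mathlib
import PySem

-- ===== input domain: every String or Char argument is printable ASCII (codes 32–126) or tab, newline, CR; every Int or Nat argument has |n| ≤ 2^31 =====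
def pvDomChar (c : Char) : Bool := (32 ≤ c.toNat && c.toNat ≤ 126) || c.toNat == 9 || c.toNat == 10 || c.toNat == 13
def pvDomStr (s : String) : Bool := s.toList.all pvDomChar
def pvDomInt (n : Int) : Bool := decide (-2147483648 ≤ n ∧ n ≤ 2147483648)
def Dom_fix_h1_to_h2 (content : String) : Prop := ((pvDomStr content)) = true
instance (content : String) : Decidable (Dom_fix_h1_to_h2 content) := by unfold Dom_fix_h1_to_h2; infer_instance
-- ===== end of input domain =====

-- B restructures A's single interleaved counting/converting loop into a locate-the-frontmatter-end
-- pass followed by a separate transform pass over the body slice only (objective: alternative).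

-- shared predicate: "line.startswith('# ') and not line.startswith('## ')" (identical text in both Pythons)
def pvCond (line : List Char) : Bool :=
  PySem.Chars.startswith line ['#', ' '] && !PySem.Chars.startswith line ['#', '#', ' ']

-- ===== PORT A =====
-- loop body of A: state = (lines, fixed, in_frontmatter, frontmatter_count); p = (i, line)
-- (lines[i] = ... : i from enumerate is a nonnegative in-range index, so .toNat is exact here)
def pvStepA (s : List (List Char) × Bool × Bool × Int) (p : Int × List Char) :
    List (List Char) × Bool × Bool × Int :=
  if PySem.Chars.strip p.2 = ['-', '-', '-'] then
    (s.1, s.2.1, (if s.2.2.2 + 1 = 2 then false else s.2.2.1), s.2.2.2 + 1)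
  else if s.2.2.2 < 2 then s
  else if pvCond p.2 then
    (s.1.set p.1.toNat ('#' :: p.2), true, s.2.2.1, s.2.2.2)
  else s

def fix_h1_to_h2 (content : String) : String × Bool :=
  let lines := PySem.Chars.splitOn content.toList ['\n']
  let r := (PySem.List.enumerate lines 0).foldl pvStepA (lines, false, false, 0)
  (String.ofList (PySem.Chars.join ['\n'] r.1), r.2.1)

-- ===== PORT B =====
-- pass 1 of Source B: walk the lines with an index, return the index just after the second '---' line
def pvFindBoundary : List (List Char) → Nat → Nat → Option Nat
  | [], _, _ => none
  | l :: rest, idx, seen =>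
    if PySem.Chars.strip l = ['-', '-', '-'] then
      if seen + 1 = 2 then some (idx + 1)
      else pvFindBoundary rest (idx + 1) (seen + 1)
    else pvFindBoundary rest (idx + 1) seen

-- pass 2 of Source B: body.append(converted or original line), fixed flag
def pvBodyStep (s : List (List Char) × Bool) (line : List Char) : List (List Char) × Bool :=
  if pvCond line then (s.1 ++ ['#' :: line], true)
  else (s.1 ++ [line], s.2)

def fix_h1_to_h2_alt (content : String) : String × Bool :=
  let lines := PySem.Chars.splitOn content.toList ['\n']
  match pvFindBoundary lines 0 0 with
  | none => (String.ofList (PySem.Chars.join ['\n'] lines), false)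
  | some b =>
    let r := (lines.drop b).foldl pvBodyStep ([], false)
    (String.ofList (PySem.Chars.join ['\n'] (lines.take b ++ r.1)), r.2)

-- ===== PRECONDITION & SPEC =====
def Spec_fix_h1_to_h2 (content : String) (out : String × Bool) : Prop := out = fix_h1_to_h2_alt content
instance (content : String) (out : String × Bool) : Decidable (Spec_fix_h1_to_h2 content out) := by unfold Spec_fix_h1_to_h2; infer_instance

-- ===== CLAIM (what is proved, stated in full; the proofs are below) =====
def Claim_equal_fix_h1_to_h2 : Prop := ∀ (content : String), Dom_fix_h1_to_h2 content → Spec_fix_h1_to_h2 content (fix_h1_to_h2 content)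

-- ===== LEMMAS AND PROOFS =====

-- the line conversion B applies in the body
def pvConv (line : List Char) : List Char := if pvCond line then '#' :: line else line

-- structural recursion computing A's loop result (list of result lines, fixed flag)
def pvGoA : List (List Char) → Bool → Bool → Int → List (List Char) × Bool
  | [], fixed, _, _ => ([], fixed)
  | l :: rest, fixed, infm, cnt =>
    if PySem.Chars.strip l = ['-', '-', '-'] then
      let s := pvGoA rest fixed (if cnt + 1 = 2 then false else infm) (cnt + 1)
      (l :: s.1, s.2)
    else if cnt < 2 then
      let s := pvGoA rest fixed infm cnt
      (l :: s.1, s.2)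
    else if pvCond l then
      let s := pvGoA rest true infm cnt
      (('#' :: l) :: s.1, s.2)
    else
      let s := pvGoA rest fixed infm cnt
      (l :: s.1, s.2)

-- a line that strips to '---' cannot start with '# '
lemma pvDisj (l : List Char) (h : PySem.Chars.strip l = ['-', '-', '-']) : pvCond l = false := by
  by_contra hc
  have hsw : PySem.Chars.startswith l ['#', ' '] = true := by
    unfold pvCond at hc
    cases hsw : PySem.Chars.startswith l ['#', ' '] <;> simp [hsw] at hc ⊢
  have hpre : ['#', ' '] <+: l := (PySem.Chars.startswith_iff _ _).mp hsw
  obtain ⟨t, ht⟩ := hpre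
  subst ht
  simp only [PySem.Chars.strip, PySem.Chars.lstrip, PySem.Chars.rstrip, List.cons_append,
    List.nil_append] at h
  rw [List.dropWhile_cons] at h
  have h1 : PySem.Chars.isspace '#' = false := by decide
  rw [h1] at h
  simp only [Bool.false_eq_true, if_false] at h
  have h2 : List.dropWhile PySem.Chars.isspace (('#' :: ' ' :: t).reverse) = ['-', '-', '-'] := by
    have := congrArg List.reverse h
    simpa using this
  have hs : ['-', '-', '-'] <:+ ('#' :: ' ' :: t).reverse := by
    rw [← h2]; exact List.dropWhile_suffix _
  obtain ⟨p', hp⟩ := hs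
  have := congrArg List.getLast? hp
  simp [List.reverse_cons, List.getLast?_append] at this

-- A's fold, started after a processed prefix `pre`, acts only on the suffix
lemma pvL1 (suf : List (List Char)) : ∀ (pre : List (List Char)) (fixed infm : Bool) (cnt : Int),
    ((PySem.List.enumerate suf (pre.length : Int)).foldl pvStepA (pre ++ suf, fixed, infm, cnt)).1
      = pre ++ (pvGoA suf fixed infm cnt).1 ∧
    ((PySem.List.enumerate suf (pre.length : Int)).foldl pvStepA (pre ++ suf, fixed, infm, cnt)).2.1
      = (pvGoA suf fixed infm cnt).2 := by
  induction suf with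
  | nil => intro pre fixed infm cnt; simp [PySem.List.enumerate_nil, pvGoA]
  | cons l rest ih =>
    intro pre fixed infm cnt
    rw [PySem.List.enumerate_cons]
    simp only [List.foldl_cons]
    by_cases h1 : PySem.Chars.strip l = ['-', '-', '-']
    · have hst : pvStepA (pre ++ l :: rest, fixed, infm, cnt) ((pre.length : Int), l)
          = (pre ++ l :: rest, fixed, (if cnt + 1 = 2 then false else infm), cnt + 1) := by
        simp [pvStepA, h1]
      rw [hst]
      have hre : pre ++ l :: rest = (pre ++ [l]) ++ rest := by simp
      have hlen : (pre.length : Int) + 1 = (((pre ++ [l]).length : Nat) : Int) := by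
        simp
      rw [hre, hlen]
      obtain ⟨ih1, ih2⟩ := ih (pre ++ [l]) fixed (if cnt + 1 = 2 then false else infm) (cnt + 1)
      constructor
      · rw [ih1]; simp [pvGoA, h1]
      · rw [ih2]; simp [pvGoA, h1]
    · by_cases h2 : cnt < 2
      · have hst : pvStepA (pre ++ l :: rest, fixed, infm, cnt) ((pre.length : Int), l)
            = (pre ++ l :: rest, fixed, infm, cnt) := by
          simp [pvStepA, h1, h2]
        rw [hst]
        have hre : pre ++ l :: rest = (pre ++ [l]) ++ rest := by simp
        have hlen : (pre.length : Int) + 1 = (((pre ++ [l]).length : Nat) : Int) := by simp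
        rw [hre, hlen]
        obtain ⟨ih1, ih2⟩ := ih (pre ++ [l]) fixed infm cnt
        constructor
        · rw [ih1]; simp [pvGoA, h1, h2]
        · rw [ih2]; simp [pvGoA, h1, h2]
      · by_cases h3 : pvCond l = true
        · have hst : pvStepA (pre ++ l :: rest, fixed, infm, cnt) ((pre.length : Int), l)
              = (pre ++ ('#' :: l) :: rest, true, infm, cnt) := by
            simp [pvStepA, h1, h2, h3]
          rw [hst]
          have hre : pre ++ ('#' :: l) :: rest = (pre ++ ['#' :: l]) ++ rest := by simp
          have hlen : (pre.length : Int) + 1 = (((pre ++ ['#' :: l]).length : Nat) : Int) := by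
            simp
          rw [hre, hlen]
          obtain ⟨ih1, ih2⟩ := ih (pre ++ ['#' :: l]) true infm cnt
          constructor
          · rw [ih1]; simp [pvGoA, h1, h2, h3]
          · rw [ih2]; simp [pvGoA, h1, h2, h3]
        · have h3' : pvCond l = false := by simpa using h3
          have hst : pvStepA (pre ++ l :: rest, fixed, infm, cnt) ((pre.length : Int), l)
              = (pre ++ l :: rest, fixed, infm, cnt) := by
            simp [pvStepA, h1, h2, h3']
          rw [hst]
          have hre : pre ++ l :: rest = (pre ++ [l]) ++ rest := by simp
          have hlen : (pre.length : Int) + 1 = (((pre ++ [l]).length : Nat) : Int) := by simp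
          rw [hre, hlen]
          obtain ⟨ih1, ih2⟩ := ih (pre ++ [l]) fixed infm cnt
          constructor
          · rw [ih1]; simp [pvGoA, h1, h2, h3']
          · rw [ih2]; simp [pvGoA, h1, h2, h3']

-- past the frontmatter (count ≥ 2) A converts every matching line and ORs the flag
lemma pvL2a (suf : List (List Char)) : ∀ (fixed infm : Bool) (cnt : Int), 2 ≤ cnt →
    pvGoA suf fixed infm cnt = (suf.map pvConv, fixed || suf.any pvCond) := by
  induction suf with
  | nil => intro fixed infm cnt _; simp [pvGoA]
  | cons l rest ih =>
    intro fixed infm cnt hcnt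
    by_cases h1 : PySem.Chars.strip l = ['-', '-', '-']
    · have hc := pvDisj l h1
      simp [pvGoA, h1, ih _ _ (cnt + 1) (by omega), pvConv, hc]
    · have h2 : ¬ cnt < 2 := by omega
      by_cases h3 : pvCond l = true
      · simp [pvGoA, h1, h2, h3, ih _ _ cnt hcnt, pvConv]
      · have h3' : pvCond l = false := by simpa using h3
        simp [pvGoA, h1, h2, h3', ih _ _ cnt hcnt, pvConv]

-- B's body fold is map + any
lemma pvL2b (l : List (List Char)) : ∀ (acc : List (List Char)) (f : Bool),
    l.foldl pvBodyStep (acc, f) = (acc ++ l.map pvConv, f || l.any pvCond) := by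
  induction l with
  | nil => intro acc f; simp
  | cons x rest ih =>
    intro acc f
    by_cases h : pvCond x = true
    · simp [pvBodyStep, h, ih, pvConv]
    · have h' : pvCond x = false := by simpa using h
      simp [pvBodyStep, h', ih, pvConv]

-- the boundary search is translation-invariant in its index argument
lemma pvShift (suf : List (List Char)) : ∀ (idx seen : Nat),
    pvFindBoundary suf idx seen = (pvFindBoundary suf 0 seen).map (· + idx) := by
  induction suf with
  | nil => intro idx seen; simp [pvFindBoundary]
  | cons l rest ih =>
    intro idx seen
    by_cases h1 : PySem.Chars.strip l = ['-', '-', '-']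
    · by_cases h2 : seen + 1 = 2
      · simp [pvFindBoundary, h1, h2, Nat.add_comm]
      · rw [pvFindBoundary, pvFindBoundary, if_pos h1, if_pos h1, if_neg h2, if_neg h2,
          ih (idx + 1), ih (0 + 1)]
        cases pvFindBoundary rest 0 (seen + 1) with
        | none => simp
        | some a => simp; omega
    · rw [pvFindBoundary, pvFindBoundary, if_neg h1, if_neg h1, ih (idx + 1), ih (0 + 1)]
      cases pvFindBoundary rest 0 seen with
      | none => simp
      | some a => simp; omega

-- B's two passes compute exactly A's loop result (before the second '---' is found)
lemma pvP2 (suf : List (List Char)) : ∀ (seen : Nat), seen < 2 →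
    (match pvFindBoundary suf 0 seen with
     | none => (suf, false)
     | some b => (suf.take b ++ (suf.drop b).map pvConv, (suf.drop b).any pvCond))
      = pvGoA suf false false (seen : Int) := by
  induction suf with
  | nil => intro seen _; simp [pvFindBoundary, pvGoA]
  | cons l rest ih =>
    intro seen hseen
    by_cases h1 : PySem.Chars.strip l = ['-', '-', '-']
    · by_cases h2 : seen + 1 = 2
      · have h2' : (seen : Int) + 1 = 2 := by omega
        rw [pvFindBoundary, if_pos h1, if_pos h2]
        simp only [List.take_succ_cons, List.take_zero, List.drop_succ_cons, List.drop_zero]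
        simp [pvGoA, h1, h2', pvL2a rest false false 2 (by omega)]
      · have h2' : ¬ ((seen : Int) + 1 = 2) := by omega
        rw [pvFindBoundary, if_pos h1, if_neg h2, pvShift]
        have hsi : ((seen + 1 : Nat) : Int) = (seen : Int) + 1 := by push_cast; ring
        have := ih (seen + 1) (by omega)
        rw [hsi] at this
        cases hb : pvFindBoundary rest 0 (seen + 1) with
        | none =>
          rw [hb] at this
          simp only [Option.map_none]
          simp [pvGoA, h1, h2', ← this]
        | some b =>
          rw [hb] at this
          simp only [Option.map_some]
          simp [pvGoA, h1, h2', ← this]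
    · rw [pvFindBoundary, if_neg h1, pvShift]
      have h2 : (seen : Int) < 2 := by omega
      have := ih seen hseen
      cases hb : pvFindBoundary rest 0 seen with
      | none =>
        rw [hb] at this
        simp only [Option.map_none]
        simp [pvGoA, h1, h2, ← this]
      | some b =>
        rw [hb] at this
        simp only [Option.map_some]
        simp [pvGoA, h1, h2, ← this]

-- both components of A's result equal B's result, for an arbitrary line list
lemma pvFinal (lines : List (List Char)) :
    (String.ofList (PySem.Chars.join ['\n']
        (((PySem.List.enumerate lines 0).foldl pvStepA (lines, false, false, 0)).1)),
     ((PySem.List.enumerate lines 0).foldl pvStepA (lines, false, false, 0)).2.1)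
    = (match pvFindBoundary lines 0 0 with
       | none => (String.ofList (PySem.Chars.join ['\n'] lines), false)
       | some b =>
         (String.ofList (PySem.Chars.join ['\n']
             (lines.take b ++ ((lines.drop b).foldl pvBodyStep ([], false)).1)),
          ((lines.drop b).foldl pvBodyStep ([], false)).2)) := by
  obtain ⟨ha1, ha2⟩ := pvL1 lines [] false false 0
  simp only [List.length_nil, Nat.cast_zero, List.nil_append] at ha1 ha2
  have hmain := pvP2 lines 0 (by omega)
  simp only [Nat.cast_zero] at hmain
  rw [ha1, ha2]
  cases hb : pvFindBoundary lines 0 0 with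
  | none =>
    rw [hb] at hmain
    simp only at hmain
    exact congrArg (fun p => (String.ofList (PySem.Chars.join ['\n'] p.1), p.2)) hmain.symm
  | some b =>
    rw [hb] at hmain
    simp only at hmain
    show (String.ofList (PySem.Chars.join ['\n'] (pvGoA lines false false 0).1),
          (pvGoA lines false false 0).2)
        = (String.ofList (PySem.Chars.join ['\n']
             (lines.take b ++ ((lines.drop b).foldl pvBodyStep ([], false)).1)),
           ((lines.drop b).foldl pvBodyStep ([], false)).2)
    rw [pvL2b (lines.drop b) [] false]
    simp only [List.nil_append, Bool.false_or]
    exact congrArg (fun p => (String.ofList (PySem.Chars.join ['\n'] p.1), p.2)) hmain.symm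

-- ===== VERDICT (by name: the statement is the Claim_ definition above) =====
theorem fix_h1_to_h2_spec : Claim_equal_fix_h1_to_h2 := by
  intro content _
  show fix_h1_to_h2 content = fix_h1_to_h2_alt content
  exact pvFinal (PySem.Chars.splitOn content.toList ['\n'])
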